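-- pv_equiv track=rewrite | github.com/kamilyrb/ToDo-App-Django | utils/datatable.py | datatable_actions
-- ===== SOURCE A (Python) =====
-- def datatable_actions(actions: list) -> str:
--     buttons = []
--
--     for action in actions:
--         buttons.append(
--             '<a href="' + (action['url'] if 'url' in action else 'javascript:;') + '"'
--             + ' class="m-portlet__nav-link btn m-btn m-btn--hover-brand m-btn--icon m-btn--icon-only m-btn--pill ' + (action['class'] if 'class' in action else '') + '"'
--             + (' title="' + action['title'] + '"' if 'title' in action else '')
--             + (' target="' + action['target'] + '"' if 'target' in action else '')
--             + (' data-title="' + action['title'] + '"' if 'title' in action else '')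
--             + (' data-event="' + action['event'] + '"' if 'event' in action else '')
--             + (' data-message="' + action['message'] + '"' if 'message' in action else '')
--             + (' data-id="' + action['id'] + '"' if 'id' in action else '')
--             + (' data-confirmurl="' + action['confirmurl'] + '"' if 'confirmurl' in action else '')
--             + (' onclick="' + action['onclick'] + '"' if 'onclick' in action else '') + '>'
--             + '<i class="' + (action['icon'] if 'icon' in action else 'fas fa-edit') + '"></i>'
--             + (' (' + action['badge'] + ') ' if 'badge' in action else '') + '</a>'
--         )
--
--     return "\n".join(buttons)
-- ===== SOURCE B (Python) =====
-- # B: a tiny template interpreter.  The button markup is DATA: a list of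
-- # template tokens ('lit', s) / ('get', key, default) / ('opt', prefix, key, suffix),
-- # rendered per action by a recursive interpreter; the rows are joined by
-- # recursion over the action list instead of collecting a list for "\n".join.
-- BUTTON_TEMPLATE = [
--     ('lit', '<a href="'),
--     ('get', 'url', 'javascript:;'),
--     ('lit', '"'),
--     ('lit', ' class="m-portlet__nav-link btn m-btn m-btn--hover-brand m-btn--icon m-btn--icon-only m-btn--pill '),
--     ('get', 'class', ''),
--     ('lit', '"'),
--     ('opt', ' title="', 'title', '"'),
--     ('opt', ' target="', 'target', '"'),
--     ('opt', ' data-title="', 'title', '"'),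
--     ('opt', ' data-event="', 'event', '"'),
--     ('opt', ' data-message="', 'message', '"'),
--     ('opt', ' data-id="', 'id', '"'),
--     ('opt', ' data-confirmurl="', 'confirmurl', '"'),
--     ('opt', ' onclick="', 'onclick', '"'),
--     ('lit', '>'),
--     ('lit', '<i class="'),
--     ('get', 'icon', 'fas fa-edit'),
--     ('lit', '"></i>'),
--     ('opt', ' (', 'badge', ') '),
--     ('lit', '</a>'),
-- ]
--
--
-- def _render(tokens, action):
--     if not tokens:
--         return ''
--     tok = tokens[0]
--     if tok[0] == 'lit':
--         head = tok[1]
--     elif tok[0] == 'get':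
--         head = action.get(tok[1], tok[2])
--     else:  # 'opt'
--         head = tok[1] + action[tok[2]] + tok[3] if tok[2] in action else ''
--     return head + _render(tokens[1:], action)
--
--
-- def datatable_actions(actions: list) -> str:
--     out = ''
--     sep = ''
--     for action in actions:
--         out += sep + _render(BUTTON_TEMPLATE, action)
--         sep = '\n'
--     return out
-- ===== Notes on version B (the rewrite author's own statement) =====
-- stated objective: alternative
-- what changed: B is a tiny template interpreter: the button markup becomes a data list of lit/get/opt tokens rendered per action by a recursive interpreter, and rows are joined by direct recursion over the action list instead of building a buttons list for '\n'.join.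
import Mathlib
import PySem

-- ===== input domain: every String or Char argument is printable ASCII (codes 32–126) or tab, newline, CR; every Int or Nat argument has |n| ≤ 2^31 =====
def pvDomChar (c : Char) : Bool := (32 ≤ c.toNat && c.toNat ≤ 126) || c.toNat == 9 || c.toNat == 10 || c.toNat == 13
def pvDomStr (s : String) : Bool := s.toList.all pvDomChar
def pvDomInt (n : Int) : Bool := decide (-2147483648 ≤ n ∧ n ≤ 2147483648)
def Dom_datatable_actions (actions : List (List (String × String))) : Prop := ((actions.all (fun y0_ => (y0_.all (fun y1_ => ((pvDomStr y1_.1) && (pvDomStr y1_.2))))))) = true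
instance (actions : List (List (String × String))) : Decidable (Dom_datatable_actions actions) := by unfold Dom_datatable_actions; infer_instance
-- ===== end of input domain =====

-- B replaces A's hard-coded per-action concatenation + "\n".join with a tiny template
-- interpreter (lit/get/opt tokens rendered recursively) and an out-and-separator
-- accumulator over the actions; objective: alternative (data-driven template vs straight-line code).

-- Shared dict primitives (a Python dict is an association list; lookup = first match):
-- 'k in action':
def pvHasKey (a : List (String × String)) (k : String) : Bool := a.any (fun p => p.1 == k)
-- action[k] (only used under a pvHasKey guard; Python raises KeyError when absent):
def pvLook (a : List (String × String)) (k : String) : String :=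
  match a.find? (fun p => p.1 == k) with
  | some p => p.2
  | none => ""
-- action.get(k, d):
def pvGetD (a : List (String × String)) (k d : String) : String :=
  match a.find? (fun p => p.1 == k) with
  | some p => p.2
  | none => d

-- ===== PORT A =====
-- the per-action button expression, literally A's big concatenation
def buttonA (action : List (String × String)) : String :=
  "<a href=\"" ++ (if pvHasKey action "url" then pvLook action "url" else "javascript:;") ++ "\""
  ++ " class=\"m-portlet__nav-link btn m-btn m-btn--hover-brand m-btn--icon m-btn--icon-only m-btn--pill " ++ (if pvHasKey action "class" then pvLook action "class" else "") ++ "\""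
  ++ (if pvHasKey action "title" then " title=\"" ++ pvLook action "title" ++ "\"" else "")
  ++ (if pvHasKey action "target" then " target=\"" ++ pvLook action "target" ++ "\"" else "")
  ++ (if pvHasKey action "title" then " data-title=\"" ++ pvLook action "title" ++ "\"" else "")
  ++ (if pvHasKey action "event" then " data-event=\"" ++ pvLook action "event" ++ "\"" else "")
  ++ (if pvHasKey action "message" then " data-message=\"" ++ pvLook action "message" ++ "\"" else "")
  ++ (if pvHasKey action "id" then " data-id=\"" ++ pvLook action "id" ++ "\"" else "")
  ++ (if pvHasKey action "confirmurl" then " data-confirmurl=\"" ++ pvLook action "confirmurl" ++ "\"" else "")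
  ++ (if pvHasKey action "onclick" then " onclick=\"" ++ pvLook action "onclick" ++ "\"" else "") ++ ">"
  ++ "<i class=\"" ++ (if pvHasKey action "icon" then pvLook action "icon" else "fas fa-edit") ++ "\"></i>"
  ++ (if pvHasKey action "badge" then " (" ++ pvLook action "badge" ++ ") " else "") ++ "</a>"

def datatable_actions (actions : List (List (String × String))) : String :=
  PySem.Str.join "\n" (actions.foldl (fun buttons action => buttons ++ [buttonA action]) [])

-- ===== PORT B =====
-- template tokens: literal text | defaulted lookup | optional attribute segment
inductive Tok
| lit : String → Tok
| get : String → String → Tok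
| opt : String → String → String → Tok
deriving DecidableEq, Repr

def pvButtonTemplate : List Tok :=
  [Tok.lit "<a href=\"",
   Tok.get "url" "javascript:;",
   Tok.lit "\"",
   Tok.lit " class=\"m-portlet__nav-link btn m-btn m-btn--hover-brand m-btn--icon m-btn--icon-only m-btn--pill ",
   Tok.get "class" "",
   Tok.lit "\"",
   Tok.opt " title=\"" "title" "\"",
   Tok.opt " target=\"" "target" "\"",
   Tok.opt " data-title=\"" "title" "\"",
   Tok.opt " data-event=\"" "event" "\"",
   Tok.opt " data-message=\"" "message" "\"",
   Tok.opt " data-id=\"" "id" "\"",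
   Tok.opt " data-confirmurl=\"" "confirmurl" "\"",
   Tok.opt " onclick=\"" "onclick" "\"",
   Tok.lit ">",
   Tok.lit "<i class=\"",
   Tok.get "icon" "fas fa-edit",
   Tok.lit "\"></i>",
   Tok.opt " (" "badge" ") ",
   Tok.lit "</a>"]

-- _render(tokens, action): recursive interpreter of the template
def renderB : List Tok → List (String × String) → String
  | [], _ => ""
  | t :: rest, a =>
    (match t with
     | Tok.lit s => s
     | Tok.get k d => pvGetD a k d
     | Tok.opt pre k suf => if pvHasKey a k then pre ++ pvLook a k ++ suf else "")
    ++ renderB rest a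

-- the outer loop: out-and-separator accumulator
def stepB (st : String × String) (action : List (String × String)) : String × String :=
  (st.1 ++ st.2 ++ renderB pvButtonTemplate action, "\n")

def datatable_actions_alt (actions : List (List (String × String))) : String :=
  (actions.foldl stepB ("", "")).1

-- ===== PRECONDITION & SPEC =====
def Spec_datatable_actions (actions : List (List (String × String))) (out : String) : Prop := out = datatable_actions_alt actions
instance (actions : List (List (String × String))) (out : String) : Decidable (Spec_datatable_actions actions out) := by unfold Spec_datatable_actions; infer_instance

-- ===== CLAIM (what is proved, stated in full; the proofs are below) =====
def Claim_equal_datatable_actions : Prop := ∀ (actions : List (List (String × String))), Dom_datatable_actions actions → Spec_datatable_actions actions (datatable_actions actions)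

-- ===== LEMMAS AND PROOFS =====

theorem getD_eq (a : List (String × String)) (k d : String) :
    pvGetD a k d = if pvHasKey a k then pvLook a k else d := by
  unfold pvGetD pvHasKey pvLook
  cases h : a.find? (fun p => p.1 == k) with
  | none =>
      have hany : a.any (fun p => p.1 == k) = false := by
        rw [List.any_eq_false]
        intro x hx
        simpa using List.find?_eq_none.mp h x hx
      simp [hany]
  | some p =>
      have hp : (p.1 == k) = true := by
        have := List.find?_some h
        simpa using this
      have hany : a.any (fun q => q.1 == k) = true :=
        List.any_eq_true.mpr ⟨p, List.mem_of_find?_eq_some h, hp⟩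
      simp [hany]

-- the interpreter applied to the concrete template produces exactly A's concatenation
theorem perAction (a : List (String × String)) :
    renderB pvButtonTemplate a = buttonA a := by
  simp only [pvButtonTemplate, renderB, getD_eq, buttonA]
  simp [String.append_assoc, -String.reduceAppend]

theorem joinNil : PySem.Str.join "\n" ([] : List String) = "" := rfl

theorem joinTwo (x y : String) (l : List String) :
    PySem.Str.join "\n" (x :: y :: l) = x ++ "\n" ++ PySem.Str.join "\n" (y :: l) := by
  apply String.toList_injective
  simp [PySem.Str.join, PySem.Chars.join_cons_cons]

theorem joinEmptyCons (x : String) (l : List String) :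
    PySem.Str.join "" (x :: l) = x ++ PySem.Str.join "" l := by
  cases l with
  | nil => simp [PySem.Str.join]
  | cons y t =>
      apply String.toList_injective
      simp [PySem.Str.join, PySem.Chars.join_cons_cons]

-- the accumulator invariant of B's outer loop
theorem auxFold (l : List (List (String × String))) (s : String) :
    (l.foldl stepB (s, "\n")).1
      = s ++ PySem.Str.join "" (l.map (fun a => "\n" ++ renderB pvButtonTemplate a)) := by
  induction l generalizing s with
  | nil => simp [PySem.Str.join]
  | cons a t ih =>
      simp only [List.foldl_cons, List.map_cons, stepB]
      rw [ih, joinEmptyCons]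
      simp [String.append_assoc]

-- "\n".join(x :: l) written with the separator folded into each later element
theorem joinShift (x : String) (l : List String) :
    PySem.Str.join "\n" (x :: l) = x ++ PySem.Str.join "" (l.map (fun y => "\n" ++ y)) := by
  induction l generalizing x with
  | nil => simp [PySem.Str.join]
  | cons y t ih =>
      rw [joinTwo, ih y, List.map_cons, joinEmptyCons]
      simp [String.append_assoc]

-- A's join over the collected buttons equals B's accumulator loop
theorem joinEqAlt (actions : List (List (String × String))) :
    PySem.Str.join "\n" (actions.map buttonA) = datatable_actions_alt actions := by
  cases actions with
  | nil => simp [joinNil, datatable_actions_alt]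
  | cons a t =>
      unfold datatable_actions_alt
      simp only [List.foldl_cons, stepB]
      simp only [List.map_cons, joinShift, perAction]
      rw [auxFold]
      simp [perAction, Function.comp_def]

-- ===== VERDICT (by name: the statement is the Claim_ definition above) =====
theorem datatable_actions_spec : Claim_equal_datatable_actions := by
  intro actions _
  unfold Spec_datatable_actions datatable_actions
  rw [PySem.List.foldl_append_singleton_eq_map, List.nil_append, joinEqAlt]
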